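-- pv_equiv track=rewrite | github.com/nulib/nul-rdc-scripts | nulrdcscripts/aproc/helpers.py | group_lists
-- ===== SOURCE A (Python) =====
-- def group_lists(original_list):
--     """
--     groups list items by the number found in them
--     """
--     grouped_lists = []
--     for value in original_list:
--         numeric_string = "".join(filter(str.isdigit, value))
--         if (
--             grouped_lists
--             and "".join(filter(str.isdigit, grouped_lists[-1][0])) == numeric_string
--         ):
--             grouped_lists[-1].append(value)
--         else:
--             grouped_lists.append([value])
--     return grouped_lists
-- ===== SOURCE B (Python) =====
-- def group_lists(original_list):
--     """
--     groups list items by the number found in them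
--     """
--     result = []
--     i = 0
--     n = len(original_list)
--     while i < n:
--         key = "".join(c for c in original_list[i] if c.isdigit())
--         j = i + 1
--         while j < n and "".join(c for c in original_list[j] if c.isdigit()) == key:
--             j += 1
--         result.append(original_list[i:j])
--         i = j
--     return result
-- ===== Notes on version B (the rewrite author's own statement) =====
-- stated objective: alternative
-- what changed: Replaces A's append-to-last-group fold (which re-extracts the digit key of the current last group's first element at every step) with a two-pointer run-splitter: compute the key of a run's first element once, extend the run while keys match, emit the slice, and continue from the run's end.
import Mathlib
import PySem

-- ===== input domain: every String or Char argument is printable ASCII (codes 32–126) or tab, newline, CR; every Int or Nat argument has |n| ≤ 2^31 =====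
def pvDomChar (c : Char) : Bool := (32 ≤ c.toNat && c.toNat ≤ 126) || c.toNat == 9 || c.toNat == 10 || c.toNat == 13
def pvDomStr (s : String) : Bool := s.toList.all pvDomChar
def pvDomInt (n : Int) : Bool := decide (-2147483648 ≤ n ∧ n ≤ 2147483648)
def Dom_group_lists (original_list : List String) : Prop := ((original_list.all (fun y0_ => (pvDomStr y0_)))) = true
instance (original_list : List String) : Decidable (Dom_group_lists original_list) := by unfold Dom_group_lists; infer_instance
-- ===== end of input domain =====

-- B is an alternative decomposition (two-pointer run-splitting instead of A's append-to-last fold); return value only, no speed claim.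

-- shared helper: "".join(filter(str.isdigit, s)) — exact on the ASCII domain via PySem.Chars.isdigit
def pvDigits (s : String) : String := String.ofList (s.toList.filter PySem.Chars.isdigit)

-- ===== PORT A =====
-- one fold over the list; grouped_lists[-1] = getLast, [0] = head (groups are never empty, headD "" is unreachable default)
def group_lists (original_list : List String) : List (List String) :=
  original_list.foldl
    (fun grouped_lists value =>
      let numeric_string := pvDigits value
      match grouped_lists.getLast? with
      | some g =>
          if pvDigits (g.headD "") == numeric_string then
            grouped_lists.dropLast ++ [g ++ [value]]
          else
            grouped_lists ++ [[value]]
      | none => grouped_lists ++ [[value]]) []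

-- ===== PORT B =====
-- two-pointer run splitter: inner while = takeWhile extension of the run, slice [i:j] = head :: run
def group_lists_alt : List String → List (List String)
  | [] => []
  | x :: xs =>
      let key := pvDigits x
      (x :: xs.takeWhile (fun y => pvDigits y == key)) ::
        group_lists_alt (xs.dropWhile (fun y => pvDigits y == key))
termination_by l => l.length
decreasing_by
  simp only [List.length_cons]
  exact Nat.lt_succ_of_le (List.length_dropWhile_le _ _)

-- ===== PRECONDITION & SPEC =====
def Spec_group_lists (original_list : List String) (out : List (List String)) : Prop := out = group_lists_alt original_list
instance (original_list : List String) (out : List (List String)) : Decidable (Spec_group_lists original_list out) := by unfold Spec_group_lists; infer_instance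

-- ===== CLAIM (what is proved, stated in full; the proofs are below) =====
def Claim_equal_group_lists : Prop := ∀ (original_list : List String), Dom_group_lists original_list → Spec_group_lists original_list (group_lists original_list)

-- ===== LEMMAS AND PROOFS =====

def pvStep (grouped_lists : List (List String)) (value : String) : List (List String) :=
  let numeric_string := pvDigits value
  match grouped_lists.getLast? with
  | some g =>
      if pvDigits (g.headD "") == numeric_string then
        grouped_lists.dropLast ++ [g ++ [value]]
      else
        grouped_lists ++ [[value]]
  | none => grouped_lists ++ [[value]]

-- main invariant: folding A's step from acc ++ [h :: t] appends the current run to the last group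
-- and then behaves like B's run splitter on the remainder
theorem pv_fold_run (l : List String) :
    ∀ (acc : List (List String)) (h : String) (t : List String),
      l.foldl pvStep (acc ++ [h :: t]) =
        acc ++ ((h :: (t ++ l.takeWhile (fun y => pvDigits y == pvDigits h))) ::
          group_lists_alt (l.dropWhile (fun y => pvDigits y == pvDigits h))) := by
  induction l with
  | nil => intro acc h t; simp [group_lists_alt]
  | cons y ys ih =>
      intro acc h t
      simp only [List.foldl_cons]
      by_cases hk : (pvDigits y == pvDigits h) = true
      · have he : pvDigits y = pvDigits h := eq_of_beq hk
        have hstep : pvStep (acc ++ [h :: t]) y = acc ++ [h :: (t ++ [y])] := by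
          simp [pvStep, List.getLast?_append, he, List.dropLast_append_of_ne_nil]
        rw [hstep, ih acc h (t ++ [y])]
        simp [hk]
      · have hstep : pvStep (acc ++ [h :: t]) y = (acc ++ [h :: t]) ++ [y :: []] := by
          have hne : pvDigits y ≠ pvDigits h := by
            intro he; exact hk (by simp [he])
          have : (pvDigits h == pvDigits y) = false := by
            simpa [beq_eq_false_iff_ne] using hne.symm
          simp [pvStep, List.getLast?_append, this]
        rw [hstep, ih (acc ++ [h :: t]) y []]
        have hk' : (pvDigits y == pvDigits h) = false := by simpa using hk
        simp [hk', group_lists_alt]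

theorem pv_eq (l : List String) : group_lists l = group_lists_alt l := by
  cases l with
  | nil => simp [group_lists, group_lists_alt]
  | cons x xs =>
      show (x :: xs).foldl pvStep [] = _
      have h1 : pvStep [] x = [] ++ [x :: []] := by simp [pvStep]
      simp only [List.foldl_cons, h1]
      rw [pv_fold_run xs [] x []]
      simp [group_lists_alt]

-- ===== VERDICT (by name: the statement is the Claim_ definition above) =====
theorem group_lists_spec : Claim_equal_group_lists := by
  intro l _
  show group_lists l = group_lists_alt l
  exact pv_eq l
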